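-- pv_equiv track=rewrite | github.com/Sweetr-feelin/py_study1 | task16_dictionary2.py | dict2
-- ===== SOURCE A (Python) =====
-- def dict2(list, n):
--     d_dict = {}
--     result = []
--     for i in list:
--         if i in d_dict:
--             d_dict[i] = d_dict.get(i) + 1
--         else:
--             d_dict[i] = 1
--
--     for k in d_dict.keys():
--         if d_dict.get(k) >= n:
--             result.append(k)
--     return result
-- ===== SOURCE B (Python) =====
-- def dict2(list, n):
--     seen = set()
--     result = []
--     for i in list:
--         if i not in seen:
--             seen.add(i)
--             if list.count(i) >= n:
--                 result.append(i)
--     return result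
-- ===== Notes on version B (the rewrite author's own statement) =====
-- stated objective: simpler
-- what changed: Replaces the two-phase build-a-count-dict-then-filter-its-keys decomposition with a single pass over the list keeping a 'seen' set and calling list.count on each first occurrence, preserving first-appearance order.
import Mathlib
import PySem

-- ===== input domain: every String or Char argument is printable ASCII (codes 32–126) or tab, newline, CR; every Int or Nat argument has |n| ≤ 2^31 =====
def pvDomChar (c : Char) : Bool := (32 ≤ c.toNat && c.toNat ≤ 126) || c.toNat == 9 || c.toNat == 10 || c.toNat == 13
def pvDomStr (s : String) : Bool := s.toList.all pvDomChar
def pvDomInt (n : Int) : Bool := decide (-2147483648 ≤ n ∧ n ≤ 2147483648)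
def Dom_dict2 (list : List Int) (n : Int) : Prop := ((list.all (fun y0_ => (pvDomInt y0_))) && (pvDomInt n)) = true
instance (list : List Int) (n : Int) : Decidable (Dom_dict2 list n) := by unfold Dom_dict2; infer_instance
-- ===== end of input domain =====

-- B replaces A's build-count-dict-then-filter-keys decomposition by a single pass with a
-- 'seen' set and list.count on each first occurrence (simpler; not claimed faster).

-- ===== PORT A =====
-- d_dict.get(i) inside the contains-branch is ported as getD i 0: the key is present there.
def dict2 (list : List Int) (n : Int) : List Int :=
  let d := list.foldl
    (fun d i => if d.contains i then d.insert i (d.getD i 0 + 1) else d.insert i 1)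
    PySem.Dict.empty
  d.keys.foldl (fun result k => if d.getD k 0 ≥ n then result ++ [k] else result) []

-- ===== PORT B =====
def dict2AltLoop (full : List Int) (n : Int) : List Int → PySem.Set Int → List Int → List Int
  | [], _, result => result
  | i :: t, seen, result =>
    if PySem.Set.contains seen i then dict2AltLoop full n t seen result
    else dict2AltLoop full n t (PySem.Set.add seen i)
      (if PySem.List.count full i ≥ n then result ++ [i] else result)

def dict2_alt (list : List Int) (n : Int) : List Int :=
  dict2AltLoop list n list PySem.Set.empty []

-- ===== PRECONDITION & SPEC =====
def Spec_dict2 (list : List Int) (n : Int) (out : List Int) : Prop := out = dict2_alt list n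
instance (list : List Int) (n : Int) (out : List Int) : Decidable (Spec_dict2 list n out) := by unfold Spec_dict2; infer_instance

-- ===== CLAIM (what is proved, stated in full; the proofs are below) =====
def Claim_equal_dict2 : Prop := ∀ (list : List Int) (n : Int), Dom_dict2 list n → Spec_dict2 list n (dict2 list n)

-- ===== LEMMAS AND PROOFS =====

-- the fresh first occurrences of l relative to seen, in order
def newKeys : List Int → List Int → List Int
  | [], _ => []
  | x :: t, seen => if x ∈ seen then newKeys t seen else x :: newKeys t (seen ++ [x])

theorem update_eq_append_newKeys (l s : List Int) :
    PySem.Set.update s l = s ++ newKeys l s := by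
  induction l generalizing s with
  | nil => simp [PySem.Set.update, newKeys]
  | cons x t ih =>
    by_cases hx : x ∈ s
    · simp [PySem.Set.update, newKeys, hx] at *
      simpa [PySem.Set.update] using ih s
    · simp only [PySem.Set.update, List.foldl_cons, newKeys, hx,
        PySem.Set.add_of_not_mem hx]
      simpa [PySem.Set.update] using ih (s ++ [x])

theorem dict2AltLoop_eq (full : List Int) (n : Int) (l : List Int) :
    ∀ (seen res : List Int),
      dict2AltLoop full n l seen res
        = res ++ (newKeys l seen).filter (fun k => decide (PySem.List.count full k ≥ n)) := by
  induction l with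
  | nil => intro seen res; simp [dict2AltLoop, newKeys]
  | cons x t ih =>
    intro seen res
    by_cases hx : x ∈ seen
    · have hc : PySem.Set.contains seen x = true := by
        simpa [PySem.Set.contains_iff] using hx
      simp [dict2AltLoop, newKeys, hx, ih]
    · have hc : PySem.Set.contains seen x = false := by
        simp [PySem.Set.contains_eq_listContains]
        simpa using hx
      simp only [dict2AltLoop, hc, Bool.false_eq_true, if_false, newKeys, hx,
        PySem.Set.add_of_not_mem hx, ih, List.filter_cons]
      split_ifs
      all_goals try simp_all
      all_goals omega

theorem dict2_foldl_eq_counter (list : List Int) :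
    list.foldl
      (fun d i => if d.contains i then d.insert i (d.getD i 0 + 1) else d.insert i 1)
      PySem.Dict.empty = PySem.Dict.counter list := by
  rw [← PySem.Dict.foldl_insert_getD_add_one_eq_counter]
  apply PySem.List.foldl_congr_mem
  intro d i _
  by_cases h : d.contains i = true
  · simp [h]
  · have hf : d.contains i = false := by simpa using h
    rw [PySem.Dict.getD_of_not_contains d 0 hf]
    simp [hf]

-- ===== VERDICT (by name: the statement is the Claim_ definition above) =====
theorem dict2_spec : Claim_equal_dict2 := by
  intro list n _
  unfold Spec_dict2 dict2 dict2_alt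
  rw [dict2_foldl_eq_counter]
  rw [PySem.List.foldl_append_ite_eq_filter]
  rw [dict2AltLoop_eq]
  have hkeys : (PySem.Dict.counter list).keys = PySem.Set.ofList list :=
    PySem.Dict.keys_counter list
  have hofl : PySem.Set.ofList list = newKeys list [] := by
    have := update_eq_append_newKeys list []
    simpa [PySem.Set.ofList_eq_foldl, PySem.Set.update] using this
  rw [hkeys, hofl]
  simp only [List.nil_append]
  apply List.filter_congr
  intro k _
  simp [PySem.Dict.getD_counter, PySem.List.count]
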